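-- pv_equiv track=rewrite | github.com/Carbonferrous/EulerPython | p024.py | toBaseFactorial
-- ===== SOURCE A (Python) =====
-- from math import factorial
--
-- def toBaseFactorial(n, s):
--     perm = list(range(0, s))
--     for a in range(s-1, -1, -1):
--         b = 0
--         while n >= factorial(a):
--             n -= factorial(a)
--             b += 1
--         if n != 0:
--             yield perm[b]
--             perm.pop(b)
--         else:
--             yield perm[b-1]
--             perm.pop(b-1)
-- ===== SOURCE B (Python) =====
-- def toBaseFactorial(n, s):
--     facts = []
--     f = 1
--     for i in range(1, s + 1):
--         facts.append(f)
--         f *= i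
--     perm = list(range(s))
--     out = []
--     for f in reversed(facts):
--         b, n = divmod(n, f)
--         out.append(perm.pop(b if n else b - 1))
--     return out
-- ===== Notes on version B (the rewrite author's own statement) =====
-- stated objective: faster
-- what changed: B builds the factorial table once as a running product and extracts each factorial digit with a single divmod, instead of A's repeated subtraction with factorial(a) recomputed from scratch on every loop test, and returns a list instead of a generator; Pre_ excludes n > s! (A raises IndexError) and negative n with s >= 1, outside the natural domain of a permutation index, where A's identity output is an accident of its never-executing subtraction loop while B's divmod indexes from the other end.
-- outside the precondition, e.g. on toBaseFactorial(-1, 3): A returns [0, 1, 2], B returns [2, 0, 1]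
import Mathlib
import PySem

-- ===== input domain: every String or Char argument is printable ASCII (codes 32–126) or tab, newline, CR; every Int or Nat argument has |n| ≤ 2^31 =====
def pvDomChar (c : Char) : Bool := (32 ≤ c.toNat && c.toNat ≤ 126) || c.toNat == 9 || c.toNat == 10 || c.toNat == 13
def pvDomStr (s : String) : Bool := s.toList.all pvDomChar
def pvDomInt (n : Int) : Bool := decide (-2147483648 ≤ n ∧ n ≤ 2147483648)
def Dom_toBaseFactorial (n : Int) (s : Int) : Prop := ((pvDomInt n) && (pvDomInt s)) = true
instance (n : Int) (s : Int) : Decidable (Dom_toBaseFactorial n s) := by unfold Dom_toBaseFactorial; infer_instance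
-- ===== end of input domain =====

-- B precomputes the factorials once with a running product and extracts each factorial digit with a
-- single divmod instead of A's repeated subtraction with the factorial recomputed on every test
-- (return value only: A is a generator, consumed as a list).

-- ===== PORT A =====

-- math.factorial (A calls it only with a ≥ 0)
def pvFact (a : Int) : Int := (Nat.factorial a.toNat : Int)

-- A's inner 'while n >= factorial(a): n -= factorial(a); b += 1'; returns the final (n, b)
def pvSubLoop (n : Int) (f : Int) (b : Int) : Int × Int :=
  if h : 1 ≤ f ∧ f ≤ n then pvSubLoop (n - f) f (b + 1) else (n, b)
termination_by n.toNat
decreasing_by omega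

-- A's 'for a in range(s-1, -1, -1)' body; each yield appends to out;
-- pyGet?/pop? = none is Python's IndexError (the generator stops with the exception)
def pvLoopA : List Int → Int → List Int → List Int → List Int
  | [], _, _, out => out
  | a :: rest, n, perm, out =>
    let f := pvFact a
    let p := pvSubLoop n f 0
    let idx := if p.1 ≠ 0 then p.2 else p.2 - 1
    match PySem.List.pyGet? perm idx with
    | none => out
    | some v =>
      match PySem.List.pop? perm idx with
      | none => out
      | some (_, perm') => pvLoopA rest p.1 perm' (out ++ [v])

def toBaseFactorial (n : Int) (s : Int) : List Int :=
  pvLoopA (PySem.List.pyRange (s - 1) (-1) (-1)) n (PySem.List.pyRange 0 s 1) []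

-- ===== PORT B =====

-- B's 'for i in range(1, s+1): facts.append(f); f *= i' — the factorial table as a running product
def pvFactsB : List Int → Int → List Int → List Int
  | [], _, facts => facts
  | i :: rest, f, facts => pvFactsB rest (f * i) (facts ++ [f])

-- B's 'for f in reversed(facts)': one divmod per digit; pop? = none is Python's IndexError
def pvLoopB : List Int → Int → List Int → List Int → List Int
  | [], _, _, out => out
  | f :: rest, n, perm, out =>
    match PySem.Int.divmod? n f with
    | none => out
    | some (b, n') =>
      let idx := if n' ≠ 0 then b else b - 1
      match PySem.List.pop? perm idx with
      | none => out
      | some (v, perm') => pvLoopB rest n' perm' (out ++ [v])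

def toBaseFactorial_alt (n : Int) (s : Int) : List Int :=
  pvLoopB (pvFactsB (PySem.List.pyRange 1 (s + 1) 1) 1 []).reverse n (PySem.List.pyRange 0 s 1) []

-- ===== PRECONDITION & SPEC =====
-- Pre_ excludes (a) n > s! with s ≥ 1, where A raises IndexError, and (b) negative n with s ≥ 1,
-- outside the natural domain of a permutation index, where A's identity output is an accident of its
-- never-executing subtraction loop (B's divmod indexes from the other end there).
-- Within Dom (|n| ≤ 2^31 < 13!) the disjunct 13 ≤ s is exactly n ≤ s! there; it only spares the
-- Decidable instance from computing factorials of astronomically large s.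
def Pre_toBaseFactorial (n : Int) (s : Int) : Prop := s ≤ 0 ∨ (0 ≤ n ∧ (13 ≤ s ∨ n ≤ pvFact s))
instance (n : Int) (s : Int) : Decidable (Pre_toBaseFactorial n s) := by unfold Pre_toBaseFactorial; infer_instance
def pvWitness_toBaseFactorial : Int × Int := (5, 3)

def Spec_toBaseFactorial (n : Int) (s : Int) (out : List Int) : Prop := out = toBaseFactorial_alt n s
instance (n : Int) (s : Int) (out : List Int) : Decidable (Spec_toBaseFactorial n s out) := by unfold Spec_toBaseFactorial; infer_instance

-- ===== CLAIM (what is proved, stated in full; the proofs are below) =====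
def Claim_equal_toBaseFactorial : Prop := ∀ (n : Int) (s : Int), Dom_toBaseFactorial n s → Pre_toBaseFactorial n s → Spec_toBaseFactorial n s (toBaseFactorial n s)

-- ===== LEMMAS AND PROOFS =====

-- pyGet? xs i is the first component of pop? xs i (both are driven by the same pyIdx?)
theorem pvGet_eq_map_pop {α : Type} (xs : List α) (i : Int) :
    PySem.List.pyGet? xs i = Option.map Prod.fst (PySem.List.pop? xs i) := by
  simp only [PySem.List.pyGet?, PySem.List.pop?]
  cases PySem.List.pyIdx? xs.length i with
  | none => rfl
  | some k => simp only [Option.bind_some]; cases xs[k]? <;> simp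

-- A's repeated subtraction is one division (positive divisor, nonnegative dividend)
theorem pvSubLoop_eq (f : Int) (hf : 1 ≤ f) : ∀ (n b : Int), 0 ≤ n → pvSubLoop n f b = (n % f, b + n / f)
  | n, b, hn => by
    rw [pvSubLoop]
    split_ifs with h
    · rw [pvSubLoop_eq f hf (n - f) (b + 1) (by omega)]
      have h1 : (n - f) % f = n % f := Int.sub_emod_right n f
      have h2 : (n - f) / f + 1 = n / f := by
        have := Int.add_mul_ediv_right (n - f) 1 (show f ≠ 0 by omega)
        simpa using this.symm
      rw [h1]; congr 1; omega
    · have hlt : n < f := by omega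
      rw [Int.emod_eq_of_lt hn hlt, Int.ediv_eq_zero_of_lt hn hlt]
      simp
termination_by n _ _ => n.toNat
decreasing_by omega

-- the two loops agree in lockstep: B's list carries the factorials A recomputes, and for a
-- nonnegative n one divmod is A's subtraction loop; the remainder stays nonnegative
theorem pvLoops_eq : ∀ (as : List Int), (∀ a ∈ as, 0 ≤ a) →
    ∀ (n : Int), 0 ≤ n → ∀ (perm out : List Int),
    pvLoopA as n perm out = pvLoopB (as.map pvFact) n perm out := by
  intro as
  induction as with
  | nil => intro _ n _ perm out; rfl
  | cons a rest ih =>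
    intro has n hn perm out
    have hrest := fun x hx => has x (List.mem_cons_of_mem a hx)
    have hf : 1 ≤ pvFact a := by
      have := Nat.factorial_pos a.toNat
      unfold pvFact; exact_mod_cast this
    have hp : pvSubLoop n (pvFact a) 0 = (n % pvFact a, 0 + n / pvFact a) :=
      pvSubLoop_eq (pvFact a) hf n 0 hn
    have hdm : PySem.Int.divmod? n (pvFact a) = some (n / pvFact a, n % pvFact a) := by
      simp [PySem.Int.divmod?, show pvFact a ≠ 0 by omega,
        Int.fdiv_eq_ediv, Int.fmod_eq_emod, show (0:Int) ≤ pvFact a by omega]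
    rw [pvLoopA, List.map_cons, pvLoopB, hdm]
    simp only [hp, zero_add]
    rw [pvGet_eq_map_pop perm (if n % pvFact a ≠ 0 then n / pvFact a else n / pvFact a - 1)]
    cases hpop : PySem.List.pop? perm (if n % pvFact a ≠ 0 then n / pvFact a else n / pvFact a - 1) with
    | none => simp
    | some r =>
      obtain ⟨v, perm'⟩ := r
      simp only [Option.map_some]
      exact ih hrest (n % pvFact a) (Int.emod_nonneg n (by omega)) _ _

theorem pvFact_succ (i : Int) (h : 1 ≤ i) : pvFact (i - 1) * i = pvFact i := by
  unfold pvFact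
  obtain ⟨k, hk⟩ : ∃ k : Nat, i = (k : Int) + 1 := ⟨(i - 1).toNat, by omega⟩
  subst hk
  have h1 : ((k : Int) + 1 - 1).toNat = k := by omega
  have h2 : ((k : Int) + 1).toNat = k + 1 := by omega
  rw [h1, h2, Nat.factorial_succ]
  push_cast; ring

-- the running product builds exactly the factorial table
theorem pvFactsB_eq : ∀ (i s : Int), 1 ≤ i → i ≤ s + 1 →
    pvFactsB (PySem.List.pyRange i (s + 1) 1) (pvFact (i - 1)) ((PySem.List.pyRange 0 (i - 1) 1).map pvFact)
      = (PySem.List.pyRange 0 s 1).map pvFact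
  | i, s, h1, h2 => by
    by_cases h : i < s + 1
    · rw [PySem.List.pyRange_one_cons h, pvFactsB]
      have hstep : (PySem.List.pyRange 0 (i - 1) 1).map pvFact ++ [pvFact (i - 1)]
          = (PySem.List.pyRange 0 (i + 1 - 1) 1).map pvFact := by
        have : PySem.List.pyRange 0 (i - 1 + 1) 1 = PySem.List.pyRange 0 (i - 1) 1 ++ [i - 1] :=
          PySem.List.pyRange_one_succ_right (by omega : (0 : Int) ≤ i - 1)
        rw [show i + 1 - 1 = i - 1 + 1 by ring, this, List.map_append]
        simp
      rw [hstep, pvFact_succ i h1]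
      have : pvFact i = pvFact (i + 1 - 1) := by norm_num
      rw [this]
      exact pvFactsB_eq (i + 1) s (by omega) (by omega)
    · have hi : i = s + 1 := by omega
      subst hi
      rw [PySem.List.pyRange_one_eq_nil (le_refl (s + 1)), pvFactsB]
      norm_num
termination_by i s _ _ => (s + 1 - i).toNat
decreasing_by omega

-- B's reversed table is A's countdown of factorials
theorem pvFacts_reverse (s : Int) :
    (pvFactsB (PySem.List.pyRange 1 (s + 1) 1) 1 []).reverse
      = (PySem.List.pyRange (s - 1) (-1) (-1)).map pvFact := by
  by_cases hs : 1 ≤ s + 1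
  · have h0 : pvFact (1 - 1) = 1 := by decide
    have h1 : ((PySem.List.pyRange 0 (1 - 1) 1).map pvFact : List Int) = [] := by decide
    have := pvFactsB_eq 1 s (le_refl 1) hs
    rw [h0, h1] at this
    rw [this, PySem.List.pyRange_neg_one_eq_reverse]
    norm_num [List.map_reverse]
  · have hnil : PySem.List.pyRange 1 (s + 1) 1 = [] := PySem.List.pyRange_one_eq_nil (by omega)
    have hnil2 : PySem.List.pyRange (s - 1) (-1) (-1) = [] := PySem.List.pyRange_neg_one_eq_nil (by omega)
    rw [hnil, hnil2, pvFactsB]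
    rfl

-- ===== VERDICT (by name: the statement is the Claim_ definition above) =====
theorem toBaseFactorial_spec : Claim_equal_toBaseFactorial := by
  intro n s _ hpre
  unfold Spec_toBaseFactorial toBaseFactorial toBaseFactorial_alt
  rw [pvFacts_reverse s]
  by_cases hs : s ≤ 0
  · rw [PySem.List.pyRange_neg_one_eq_nil (by omega)]
    rfl
  · have hn : 0 ≤ n := by
      rcases hpre with h | ⟨h, _⟩
      · omega
      · exact h
    exact pvLoops_eq _ (fun a ha => by
        have := PySem.List.mem_pyRange_neg_one.mp ha; omega) n hn _ []
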